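-- pv_equiv track=rewrite | github.com/acraugh/doi-service | pds_doi_core/actions/check.py | _get_status_per_submitter_per_node
-- ===== SOURCE A (Python) =====
-- def _get_status_per_submitter_per_node(i_check_result, i_submitter):
--     """Function return a dictionary of lists for different nodes for a particular submitter."""
--     o_dicts_per_submitter_per_node = {}
--
--     for ii in range(0,len(i_check_result)):
--         if i_check_result[ii]['submitter'].lower() == i_submitter:
--            node_key = i_check_result[ii]['node_id'].lower()
--            if node_key not in o_dicts_per_submitter_per_node:
--                o_dicts_per_submitter_per_node[node_key] = [] # Start with an empty list.
--            o_dicts_per_submitter_per_node[node_key].append(i_check_result[ii])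
--
--     # end for ii in range(0,len(i_check_result)):
--
--     return o_dicts_per_submitter_per_node
-- ===== SOURCE B (Python) =====
-- def _get_status_per_submitter_per_node(i_check_result, i_submitter):
--     """Group the matching rows by node: filter once, list the distinct node keys, then build each group by a per-key filter."""
--     matches = [row for row in i_check_result if row['submitter'].lower() == i_submitter]
--     node_keys = list(dict.fromkeys(row['node_id'].lower() for row in matches))
--     return {k: [row for row in matches if row['node_id'].lower() == k] for k in node_keys}
-- ===== Notes on version B (the rewrite author's own statement) =====
-- stated objective: alternative
-- what changed: A builds the grouping in one index loop over the input, mutating a dict entry per row; B first filters the matching rows, takes the ordered dedup of their node keys via dict.fromkeys, and builds each group with a per-key filter in a dict comprehension.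
import Mathlib
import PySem

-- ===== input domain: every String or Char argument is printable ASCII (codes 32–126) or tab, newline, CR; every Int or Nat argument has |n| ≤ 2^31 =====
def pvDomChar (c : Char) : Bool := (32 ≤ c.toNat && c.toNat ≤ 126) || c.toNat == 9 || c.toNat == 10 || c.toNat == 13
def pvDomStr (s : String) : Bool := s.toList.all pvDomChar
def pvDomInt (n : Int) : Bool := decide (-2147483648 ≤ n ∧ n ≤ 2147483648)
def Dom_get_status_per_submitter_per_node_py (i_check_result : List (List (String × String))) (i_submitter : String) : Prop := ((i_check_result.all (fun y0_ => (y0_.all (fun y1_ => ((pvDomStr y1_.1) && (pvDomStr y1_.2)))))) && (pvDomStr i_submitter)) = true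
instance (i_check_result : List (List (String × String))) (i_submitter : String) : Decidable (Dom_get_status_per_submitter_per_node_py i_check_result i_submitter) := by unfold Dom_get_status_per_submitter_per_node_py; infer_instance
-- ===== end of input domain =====

-- B replaces A's index loop with dict accumulation by a filter of the matching rows, an ordered
-- dedup of their node keys, and one per-key filter per group (objective: alternative decomposition).

-- row['k'] on a dict passed as an association list: first match (none = KeyError)
def pvRowGet? (row : List (String × String)) (k : String) : Option String :=
  (row.find? (fun p => p.1 == k)).map (·.2)

-- total form, used by the ports; Pre_ guarantees the key is present
def pvRowGetD (row : List (String × String)) (k d : String) : String :=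
  (pvRowGet? row k).getD d

-- ===== PORT A =====
def get_status_per_submitter_per_node_py (i_check_result : List (List (String × String))) (i_submitter : String) : List (String × List (List (String × String))) :=
  (i_check_result.foldl
    (fun d row =>
      if PySem.Str.lower (pvRowGetD row "submitter" "") == i_submitter then
        let node_key := PySem.Str.lower (pvRowGetD row "node_id" "")
        let d := if d.contains node_key then d else d.insert node_key []
        d.modify node_key [] (fun v => v ++ [row])
      else d)
    PySem.Dict.empty).items

-- ===== PORT B =====
def get_status_per_submitter_per_node_py_alt (i_check_result : List (List (String × String))) (i_submitter : String) : List (String × List (List (String × String))) :=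
  let rows := i_check_result.filter (fun row => PySem.Str.lower (pvRowGetD row "submitter" "") == i_submitter)
  let node_keys := PySem.List.dedup (rows.map (fun row => PySem.Str.lower (pvRowGetD row "node_id" "")))
  node_keys.map (fun k => (k, rows.filter (fun row => PySem.Str.lower (pvRowGetD row "node_id" "") == k)))

-- ===== PRECONDITION & SPEC =====
-- Pre_ excludes inputs where Python A raises KeyError: every row must carry a 'submitter' key,
-- and each row whose lowered submitter matches must also carry a 'node_id' key.
def Pre_get_status_per_submitter_per_node_py (i_check_result : List (List (String × String))) (i_submitter : String) : Prop :=
  ∀ row ∈ i_check_result,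
    (pvRowGet? row "submitter").isSome = true ∧
    (PySem.Str.lower (pvRowGetD row "submitter" "") == i_submitter →
      (pvRowGet? row "node_id").isSome = true)
instance (i_check_result : List (List (String × String))) (i_submitter : String) : Decidable (Pre_get_status_per_submitter_per_node_py i_check_result i_submitter) := by unfold Pre_get_status_per_submitter_per_node_py; infer_instance

def pvWitness_get_status_per_submitter_per_node_py : (List (List (String × String))) × String :=
  ([[("submitter", "Alice"), ("node_id", "N1")], [("submitter", "bob"), ("node_id", "n1")]], "alice")

def Spec_get_status_per_submitter_per_node_py (i_check_result : List (List (String × String))) (i_submitter : String) (out : List (String × List (List (String × String)))) : Prop := out = get_status_per_submitter_per_node_py_alt i_check_result i_submitter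
instance (i_check_result : List (List (String × String))) (i_submitter : String) (out : List (String × List (List (String × String)))) : Decidable (Spec_get_status_per_submitter_per_node_py i_check_result i_submitter out) := by unfold Spec_get_status_per_submitter_per_node_py; infer_instance

-- ===== CLAIM (what is proved, stated in full; the proofs are below) =====
def Claim_equal_get_status_per_submitter_per_node_py : Prop := ∀ (i_check_result : List (List (String × String))) (i_submitter : String), Dom_get_status_per_submitter_per_node_py i_check_result i_submitter → Pre_get_status_per_submitter_per_node_py i_check_result i_submitter → Spec_get_status_per_submitter_per_node_py i_check_result i_submitter (get_status_per_submitter_per_node_py i_check_result i_submitter)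

-- ===== LEMMAS AND PROOFS =====

-- A's 'if k not in d: d[k] = []' followed by 'd[k].append(row)' is one modify step
theorem pv_setdefault_modify (d : PySem.Dict String (List (List (String × String)))) (k : String) (row : List (String × String)) :
    (if d.contains k then d else d.insert k []).modify k [] (fun v => v ++ [row])
      = d.modify k [] (fun v => v ++ [row]) := by
  by_cases h : d.contains k
  · simp [h]
  · have hc : d.contains k = false := by simpa using h
    simp [hc, PySem.Dict.modify, PySem.Dict.getD_insert_self, PySem.Dict.insert_insert_self,
      PySem.Dict.getD_of_not_contains]

-- a guarded fold is a fold over the filtered list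
theorem pv_foldl_guard {α β : Type} (p : α → Bool) (g : β → α → β) :
    ∀ (xs : List α) (init : β),
      xs.foldl (fun acc x => if p x then g acc x else acc) init = (xs.filter p).foldl g init := by
  intro xs
  induction xs with
  | nil => intro init; rfl
  | cons x xs ih =>
    intro init
    by_cases h : p x <;> simp [h, ih]

-- the grouping fold looked up at one key yields that key's filtered rows, in order
theorem pv_getD_group (key : List (String × String) → String) (m : List (List (String × String))) (k : String) :
    ((m.foldl (fun d row => d.modify (key row) [] (fun v => v ++ [row])) PySem.Dict.empty).getD k [])
      = m.filter (fun row => key row == k) := by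
  have h := PySem.Dict.getD_foldl_modify_append
    (l := m.map (fun row => (key row, row))) (d := (PySem.Dict.empty : PySem.Dict String (List (List (String × String))))) (c := k)
  rw [List.foldl_map] at h
  rw [h, List.filter_map, List.map_map]
  simp [Function.comp_def]

-- ===== VERDICT (by name: the statement is the Claim_ definition above) =====
theorem get_status_per_submitter_per_node_py_spec : Claim_equal_get_status_per_submitter_per_node_py := by
  intro xs sub _ _
  unfold Spec_get_status_per_submitter_per_node_py
  unfold get_status_per_submitter_per_node_py get_status_per_submitter_per_node_py_alt
  simp only [pv_setdefault_modify]
  rw [pv_foldl_guard]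
  set key : List (String × String) → String := fun row => PySem.Str.lower (pvRowGetD row "node_id" "") with hkey
  set m := xs.filter (fun row => PySem.Str.lower (pvRowGetD row "submitter" "") == sub) with hm
  have hnd : (m.foldl (fun d row => d.modify (key row) [] (fun v => v ++ [row])) PySem.Dict.empty).keys.Nodup :=
    PySem.Dict.nodup_keys_foldl_modify_key m key [] (fun _ row => fun v => v ++ [row]) PySem.Dict.empty (by simp)
  rw [PySem.Dict.items_eq_map_keys _ hnd []]
  rw [PySem.Dict.keys_foldl_modify_key]
  simp only [PySem.Dict.keys_empty, PySem.Set.update_nil_left, PySem.List.dedup_eq_ofList]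
  exact List.map_congr_left (fun k _ => by rw [pv_getD_group])
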